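-- pv_equiv track=rewrite | github.com/basti42/advent_of_code_2017 | day14/knothash.py | dense_it_up
-- ===== SOURCE A (Python) =====
-- from functools import reduce
--
-- def dense_it_up(sparse):
--     """making the sparse hash dense and return it"""
--     dense = []
--     for j in range(0,len(sparse),16):
--         val = reduce(lambda a,b: a ^ b, sparse[j:j+16])
--         hex_val = hex(val).replace('0x','')
--         if len(hex_val) == 1: hex_val = '0'+hex_val
--         dense.append(hex_val)
--     return "".join(dense)
-- ===== SOURCE B (Python) =====
-- def dense_it_up(sparse):
--     """making the sparse hash dense and return it"""
--     out = []
--     acc = 0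
--     count = 0
--     for v in sparse:
--         acc ^= v
--         count += 1
--         if count == 16:
--             out.append(format(acc, '02x'))
--             acc = 0
--             count = 0
--     if count != 0:
--         out.append(format(acc, '02x'))
--     return "".join(out)
-- ===== Notes on version B (the rewrite author's own statement) =====
-- stated objective: simpler
-- what changed: Replaces the range/slice/reduce block decomposition by one flat pass over the list with a running XOR accumulator and element counter that flushes a formatted byte every 16 elements (and once more for a trailing partial block), using format(acc,'02x') instead of hex().replace() plus manual padding.
import Mathlib
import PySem

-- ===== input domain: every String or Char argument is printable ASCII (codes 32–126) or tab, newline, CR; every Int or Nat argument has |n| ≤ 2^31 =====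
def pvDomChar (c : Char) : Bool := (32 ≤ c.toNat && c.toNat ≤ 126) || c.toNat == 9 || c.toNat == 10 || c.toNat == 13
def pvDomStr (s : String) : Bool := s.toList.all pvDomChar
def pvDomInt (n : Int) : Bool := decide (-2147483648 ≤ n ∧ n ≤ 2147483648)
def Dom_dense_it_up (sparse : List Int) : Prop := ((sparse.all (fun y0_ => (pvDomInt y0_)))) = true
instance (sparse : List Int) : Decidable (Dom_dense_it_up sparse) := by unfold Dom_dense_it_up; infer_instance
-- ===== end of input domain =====

-- B replaces the range/slice/reduce block decomposition by one flat counter-driven pass; objective: simpler.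


-- ===== PORT A =====
-- lowercase hex digit; exact for the digits CPython's hex()/'%x' emits
def pvHexDigit (n : Nat) : Char := if n < 10 then Char.ofNat (48 + n) else Char.ofNat (87 + n)

-- hex digits of n (most significant first), fuel-structural; exact for hex(n) without the '0x' prefix, n ≥ 0
def pvHexCore : Nat → Nat → List Char → List Char
  | 0, _, acc => acc
  | fuel + 1, n, acc =>
      let acc' := pvHexDigit (n % 16) :: acc
      if n / 16 = 0 then acc' else pvHexCore fuel (n / 16) acc'

def pvHexChars (n : Nat) : List Char := pvHexCore (n + 1) n []

-- hex(v).replace('0x','') followed by A's pad: prepend '0' exactly when the length is 1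
def pvHexA (v : Int) : String :=
  let s := if v < 0 then '-' :: pvHexChars v.natAbs else pvHexChars v.natAbs
  if s.length = 1 then String.ofList ('0' :: s) else String.ofList s

def dense_it_up (sparse : List Int) : String :=
  let dense := (PySem.List.pyRange 0 (PySem.List.len sparse) 16).foldl
    (fun dense j =>
      let block := PySem.List.slice sparse (some j) (some (j + 16))
      -- reduce(lambda a,b: a ^ b, block); every visited slice is nonempty, so the [] arm is unreachable
      let val := match block with
        | [] => 0
        | b :: bs => bs.foldl PySem.Int.bxor b
      dense ++ [pvHexA val]) []
  PySem.Str.join "" dense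

-- ===== PORT B =====
-- format(v, '02x'): zero-pad to width 2 (the sign counts toward the width)
def pvHex02 (v : Int) : String :=
  let s := if v < 0 then '-' :: pvHexChars v.natAbs else pvHexChars v.natAbs
  if s.length < 2 then String.ofList ('0' :: s) else String.ofList s

-- loop body of B: state (out, acc, count)
def pvStepB (st : List String × Int × Int) (v : Int) : List String × Int × Int :=
  let acc := PySem.Int.bxor st.2.1 v
  let count := st.2.2 + 1
  if count = 16 then (st.1 ++ [pvHex02 acc], 0, 0) else (st.1, acc, count)

def dense_it_up_alt (sparse : List Int) : String :=
  let st := sparse.foldl pvStepB ([], 0, 0)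
  let out := if st.2.2 ≠ 0 then st.1 ++ [pvHex02 st.2.1] else st.1
  PySem.Str.join "" out

-- ===== PRECONDITION & SPEC =====
def Spec_dense_it_up (sparse : List Int) (out : String) : Prop := out = dense_it_up_alt sparse
instance (sparse : List Int) (out : String) : Decidable (Spec_dense_it_up sparse out) := by unfold Spec_dense_it_up; infer_instance

-- ===== CLAIM (what is proved, stated in full; the proofs are below) =====
def Claim_equal_dense_it_up : Prop := ∀ (sparse : List Int), Dom_dense_it_up sparse → Spec_dense_it_up sparse (dense_it_up sparse)

-- ===== LEMMAS AND PROOFS =====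

-- the common chunk decomposition both ports compute
def pvChunks : List Int → List String
  | [] => []
  | x :: xs =>
      pvHex02 (((x :: xs).take 16).foldl PySem.Int.bxor 0) :: pvChunks ((x :: xs).drop 16)
termination_by l => l.length
decreasing_by simp

theorem pvHexCore_ne_nil (fuel n : Nat) (acc : List Char) (h : acc ≠ []) :
    pvHexCore fuel n acc ≠ [] := by
  induction fuel generalizing n acc with
  | zero => simpa [pvHexCore] using h
  | succ fuel ih =>
      simp only [pvHexCore]
      split
      · simp
      · exact ih _ _ (by simp)

theorem pvHexCore_succ_ne_nil (fuel n : Nat) (acc : List Char) :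
    pvHexCore (fuel + 1) n acc ≠ [] := by
  simp only [pvHexCore]
  split
  · simp
  · exact pvHexCore_ne_nil _ _ _ (by simp)

theorem pvHexChars_len (n : Nat) : 1 ≤ (pvHexChars n).length := by
  have h := pvHexCore_succ_ne_nil n n []
  rw [List.ne_nil_iff_length_pos] at h
  exact h

theorem pvHexA_eq (v : Int) : pvHexA v = pvHex02 v := by
  unfold pvHexA pvHex02
  have h := pvHexChars_len v.natAbs
  by_cases hv : v < 0 <;> simp only [hv, if_true, if_false]
  · split_ifs with h1 h2 <;> first | rfl | (simp only [List.length_cons] at *; omega)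
  · split_ifs with h1 h2 <;> first | rfl | omega

-- ---------- B side ----------
theorem B_partial (b : List Int) (out : List String) (acc c : Int)
    (h : c + b.length < 16) :
    List.foldl pvStepB (out, acc, c) b = (out, b.foldl PySem.Int.bxor acc, c + b.length) := by
  induction b generalizing acc c with
  | nil => simp
  | cons v b ih =>
      have hc : ¬ ((c + 1 : Int) = 16) := by
        simp only [List.length_cons] at h; push_cast at h ⊢; omega
      simp only [List.foldl_cons, pvStepB, hc, if_false]
      rw [ih _ _ (by simp only [List.length_cons] at h ⊢; push_cast at h ⊢; omega)]
      simp only [List.length_cons, Prod.mk.injEq]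
      refine ⟨trivial, trivial, by push_cast; ring⟩

theorem B_full (b : List Int) (out : List String) (acc c : Int)
    (hb : b ≠ []) (h : c + b.length = 16) :
    List.foldl pvStepB (out, acc, c) b = (out ++ [pvHex02 (b.foldl PySem.Int.bxor acc)], 0, 0) := by
  induction b generalizing out acc c with
  | nil => exact absurd rfl hb
  | cons v b ih =>
      by_cases hbn : b = []
      · subst hbn
        have hc : (c + 1 : Int) = 16 := by simp at h; omega
        simp [pvStepB, hc]
      · have hc : ¬ ((c + 1 : Int) = 16) := by
          have : 1 ≤ b.length := List.length_pos_iff.mpr hbn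
          simp only [List.length_cons] at h; push_cast at h ⊢; omega
        simp only [List.foldl_cons, pvStepB, hc, if_false]
        rw [ih _ _ _ hbn (by simp only [List.length_cons] at h ⊢; push_cast at h ⊢; omega)]

theorem B_main (l : List Int) : ∀ (out : List String),
    (let st := List.foldl pvStepB (out, 0, 0) l
     if st.2.2 ≠ 0 then st.1 ++ [pvHex02 st.2.1] else st.1) = out ++ pvChunks l := by
  induction l using pvChunks.induct with
  | case1 => intro out; simp [pvChunks]
  | case2 x xs ih =>
      intro out
      by_cases hlen : (x :: xs).length < 16
      · rw [B_partial _ _ _ _ (by omega)]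
        have hne : ¬ ((xs.length : Int) + 1 = 0) := by omega
        simp only [List.length_cons, Nat.cast_add, Nat.cast_one, zero_add, ne_eq, hne,
          not_false_eq_true, if_true]
        rw [pvChunks]
        rw [List.take_of_length_le (by omega), List.drop_eq_nil_of_le (by omega)]
        simp [pvChunks]
      · have h16 : 16 ≤ (x :: xs).length := by omega
        have hsplit : List.foldl pvStepB (out, 0, 0) (x :: xs) =
            List.foldl pvStepB (List.foldl pvStepB (out, 0, 0) ((x :: xs).take 16)) ((x :: xs).drop 16) := by
          conv_lhs => rw [← List.take_append_drop 16 (x :: xs)]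
          rw [List.foldl_append]
        have hlt : (x :: xs).take 16 ≠ [] := by
          simp
        have hl16 : (0 : Int) + ((x :: xs).take 16).length = 16 := by
          rw [List.length_take]; push_cast; omega
        rw [hsplit, B_full _ _ _ _ hlt hl16, ih]
        rw [pvChunks]
        simp

-- ---------- A side ----------
theorem foldl_append_singleton {α β : Type} (f : α → β) (xs : List α) (out : List β) :
    xs.foldl (fun acc x => acc ++ [f x]) out = out ++ xs.map f := by
  induction xs generalizing out with
  | nil => simp
  | cons x xs ih => simp [ih]

theorem A_range (l : List Int) :
    PySem.List.pyRange 0 (PySem.List.len l) 16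
      = (List.range ((l.length + 15) / 16)).map (fun k => ((16 * k : Nat) : Int)) := by
  rw [PySem.List.len_eq, PySem.List.pyRange_of_pos _ _ (by norm_num)]
  by_cases h : (0 : Int) < l.length
  · rw [if_pos h]
    have : ((( (l.length : Int) - 0 + 16 - 1) / 16).toNat) = (l.length + 15) / 16 := by omega
    rw [this]
    exact List.map_congr_left (fun k _ => by push_cast; ring)
  · have h0 : l.length = 0 := by omega
    rw [if_neg h]
    simp [h0]

theorem A_chunks (l : List Int) :
    (List.range ((l.length + 15) / 16)).map
      (fun k => pvHex02 (((l.drop (16 * k)).take 16).foldl PySem.Int.bxor 0)) = pvChunks l := by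
  induction l using pvChunks.induct with
  | case1 => simp [pvChunks]
  | case2 x xs ih =>
      have hlen : 1 ≤ (x :: xs).length := by simp
      have hc : ((x :: xs).length + 15) / 16 = (((x :: xs).drop 16).length + 15) / 16 + 1 := by
        rw [List.length_drop]; omega
      rw [hc, List.range_succ_eq_map, List.map_cons, List.map_map, pvChunks]
      refine congrArg₂ List.cons (by norm_num) ?_
      rw [← ih]
      simp only [Function.comp_def]
      refine List.map_congr_left (fun k _ => ?_)
      have hd : List.drop (16 * Nat.succ k) (x :: xs)
          = List.drop (16 * k) (List.drop 16 (x :: xs)) := by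
        rw [List.drop_drop]
        congr 1
        omega
      rw [hd]

theorem A_eq (l : List Int) :
    dense_it_up l = PySem.Str.join "" (pvChunks l) := by
  simp only [dense_it_up]
  rw [A_range, List.foldl_map, foldl_append_singleton]
  congr 1
  rw [← A_chunks l]
  refine List.map_congr_left (fun k hk => ?_)
  rw [List.mem_range] at hk
  have hkl : 16 * k < l.length := by omega
  have hslice : PySem.List.slice l (some ((16 * k : Nat) : Int)) (some (((16 * k : Nat) : Int) + 16))
      = (l.drop (16 * k)).take 16 := by
    have h16 : ((16 * k : Nat) : Int) + 16 = ((16 * k : Nat) : Int) + ((16 : Nat) : Int) := by norm_num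
    rw [h16, PySem.List.slice_natCast_add]
  rw [hslice]
  have hne : (l.drop (16 * k)).take 16 ≠ [] := by
    simp [List.take_eq_nil_iff, List.drop_eq_nil_iff]
    omega
  obtain ⟨b, bs, hbs⟩ : ∃ b bs, (l.drop (16 * k)).take 16 = b :: bs := by
    cases h : (l.drop (16 * k)).take 16 with
    | nil => exact absurd h hne
    | cons b bs => exact ⟨b, bs, rfl⟩
  rw [hbs, pvHexA_eq]
  congr 1
  simp only [List.foldl_cons]
  rw [PySem.Int.bxor_comm, PySem.Int.bxor_zero]

theorem B_eq (l : List Int) :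
    dense_it_up_alt l = PySem.Str.join "" (pvChunks l) := by
  simp only [dense_it_up_alt]
  rw [B_main l []]
  rfl

-- ===== VERDICT (by name: the statement is the Claim_ definition above) =====
theorem dense_it_up_spec : Claim_equal_dense_it_up := by
  intro sparse _
  show dense_it_up sparse = dense_it_up_alt sparse
  rw [A_eq, B_eq]
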